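-- pv_equiv track=rewrite | github.com/gmh5225/spu2c | spu2c.py | fsmbi
-- ===== SOURCE A (Python) =====
-- def fsmbi(opcode):
-- 	rt  = opcode & 0x7F
-- 	i44 = (opcode >> 7)  & 0xF
-- 	i43 = (opcode >> 11) & 0xF
-- 	i42 = (opcode >> 15) & 0xF
-- 	i41 = (opcode >> 19) & 0xF
-- 	mask_44 = 0
-- 	mask_43 = 0
-- 	mask_42 = 0
-- 	mask_41 = 0
-- 	i = 0
-- 	while i < 4:
-- 		mask_temp = i44 & (1<<i)
-- 		if mask_temp != 0:
-- 			mask_44 = mask_44 | (0xFF << (i*8))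
-- 		i += 1
-- 	i = 0
-- 	while i < 4:
-- 		mask_temp = i43 & (1<<i)
-- 		if mask_temp != 0:
-- 			mask_43 = mask_43 | (0xFF << (i*8))
-- 		i += 1
-- 	i = 0
-- 	while i < 4:
-- 		mask_temp = i42 & (1<<i)
-- 		if mask_temp != 0:
-- 			mask_42 = mask_42 | (0xFF << (i*8))
-- 		i += 1
-- 	i = 0
-- 	while i < 4:
-- 		mask_temp = i41 & (1<<i)
-- 		if mask_temp != 0:
-- 			mask_41 = mask_41 | (0xFF << (i*8))
-- 		i += 1
-- 	cmt = "r{:d}[128b] = 0x{:08X}:{:08X}:{:08X}:{:08X}".format(rt, mask_41,mask_42,mask_43,mask_44)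
-- 	return cmt
-- ===== SOURCE B (Python) =====
-- def fsmbi(opcode):
-- 	# Each nibble is expanded to a 32-bit byte mask by a closed-form
-- 	# bit-spreading multiply instead of a per-bit loop:
-- 	# n * 0x00204081 copies bit i to positions i, i+7, i+14, i+21, so
-- 	# masking with 0x01010101 leaves bit i at position 8*i; scaling by
-- 	# 0xFF turns each surviving bit into a full byte.
-- 	expand = lambda n: (n * 0x00204081 & 0x01010101) * 0xFF
-- 	rt = opcode & 0x7F
-- 	return "r{:d}[128b] = 0x{:08X}:{:08X}:{:08X}:{:08X}".format(
-- 		rt,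
-- 		expand(opcode >> 19 & 0xF),
-- 		expand(opcode >> 15 & 0xF),
-- 		expand(opcode >> 11 & 0xF),
-- 		expand(opcode >> 7 & 0xF))
-- ===== Notes on version B (the rewrite author's own statement) =====
-- stated objective: simpler
-- what changed: Replaces the four 4-iteration bit-test loops by a closed-form bit-spreading multiply ((n*0x00204081 & 0x01010101)*0xFF) that expands each nibble to its byte mask in one expression.
import Mathlib
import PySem

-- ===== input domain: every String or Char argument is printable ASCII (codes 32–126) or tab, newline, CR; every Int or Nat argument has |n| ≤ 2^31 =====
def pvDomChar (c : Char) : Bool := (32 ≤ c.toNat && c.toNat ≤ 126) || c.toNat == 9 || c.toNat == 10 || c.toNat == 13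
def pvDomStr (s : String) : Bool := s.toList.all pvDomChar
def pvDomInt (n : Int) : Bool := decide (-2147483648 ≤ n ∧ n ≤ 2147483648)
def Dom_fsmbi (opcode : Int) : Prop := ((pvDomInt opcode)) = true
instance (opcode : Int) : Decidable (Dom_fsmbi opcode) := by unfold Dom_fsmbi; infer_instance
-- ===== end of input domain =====

-- B replaces A's four per-bit while-loops by a closed-form bit-spreading multiply per nibble; same output string.


-- shared port of Python's "{:08X}".format(m) for 0 ≤ m (exact there; both Pythons use the identical format string)
def hexDigitU (n : Nat) : Char := if n < 10 then Char.ofNat (48 + n) else Char.ofNat (55 + n)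

def hexCharsRev (n : Nat) : List Char :=
  if h : n = 0 then [] else hexDigitU (n % 16) :: hexCharsRev (n / 16)
termination_by n
decreasing_by exact Nat.div_lt_self (Nat.pos_of_ne_zero h) (by decide)

def hex8 (m : Int) : String :=
  PySem.Str.zfill (String.ofList (if m = 0 then ['0'] else (hexCharsRev m.toNat).reverse)) 8

-- ===== PORT A =====
-- A's four while-loops are character-for-character identical; ported once as this helper.
def fsmbiMaskLoop (nib : Int) : Int :=
  (List.range 4).foldl (fun mask i =>
    if PySem.Int.band nib ((1 : Int) <<< i) ≠ 0 then PySem.Int.bor mask ((0xFF : Int) <<< (i * 8))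
    else mask) 0

def fsmbi (opcode : Int) : String :=
  let rt  := PySem.Int.band opcode 0x7F
  let i44 := PySem.Int.band (opcode >>> 7) 0xF
  let i43 := PySem.Int.band (opcode >>> 11) 0xF
  let i42 := PySem.Int.band (opcode >>> 15) 0xF
  let i41 := PySem.Int.band (opcode >>> 19) 0xF
  let mask44 := fsmbiMaskLoop i44
  let mask43 := fsmbiMaskLoop i43
  let mask42 := fsmbiMaskLoop i42
  let mask41 := fsmbiMaskLoop i41
  "r" ++ PySem.Int.toStr rt ++ "[128b] = 0x" ++ hex8 mask41 ++ ":" ++ hex8 mask42 ++ ":"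
    ++ hex8 mask43 ++ ":" ++ hex8 mask44

-- ===== PORT B =====
def fsmbiExpand (n : Int) : Int := PySem.Int.band (n * 0x00204081) 0x01010101 * 0xFF

def fsmbi_alt (opcode : Int) : String :=
  let rt := PySem.Int.band opcode 0x7F
  "r" ++ PySem.Int.toStr rt ++ "[128b] = 0x"
    ++ hex8 (fsmbiExpand (PySem.Int.band (opcode >>> 19) 0xF)) ++ ":"
    ++ hex8 (fsmbiExpand (PySem.Int.band (opcode >>> 15) 0xF)) ++ ":"
    ++ hex8 (fsmbiExpand (PySem.Int.band (opcode >>> 11) 0xF)) ++ ":"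
    ++ hex8 (fsmbiExpand (PySem.Int.band (opcode >>> 7) 0xF))

-- ===== PRECONDITION & SPEC =====
def Spec_fsmbi (opcode : Int) (out : String) : Prop := out = fsmbi_alt opcode
instance (opcode : Int) (out : String) : Decidable (Spec_fsmbi opcode out) := by unfold Spec_fsmbi; infer_instance

-- ===== CLAIM (what is proved, stated in full; the proofs are below) =====
def Claim_equal_fsmbi : Prop := ∀ (opcode : Int), Dom_fsmbi opcode → Spec_fsmbi opcode (fsmbi opcode)

-- ===== LEMMAS AND PROOFS =====
theorem band15_bounds (a : Int) : 0 ≤ PySem.Int.band a 0xF ∧ PySem.Int.band a 0xF ≤ 15 := by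
  unfold PySem.Int.band
  split_ifs with h1 h2 h2
  · have := Nat.and_le_right (n := a.toNat) (m := (0xF : Int).toNat)
    constructor <;> [exact Int.natCast_nonneg _; exact_mod_cast (by simpa using this)]
  · omega
  · constructor
    · exact Int.natCast_nonneg _
    · have : (0xF : Int).toNat - ((0xF : Int).toNat &&& (-a - 1).toNat) ≤ 15 := by omega
      exact_mod_cast this
  · omega

theorem mask_eq (a : Int) :
    fsmbiMaskLoop (PySem.Int.band a 0xF) = fsmbiExpand (PySem.Int.band a 0xF) := by
  obtain ⟨h0, h1⟩ := band15_bounds a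
  set n := PySem.Int.band a 0xF with hn
  clear_value n
  interval_cases n <;> decide

-- ===== VERDICT (by name: the statement is the Claim_ definition above) =====
theorem fsmbi_spec : Claim_equal_fsmbi := by
  intro opcode _
  show fsmbi opcode = fsmbi_alt opcode
  simp only [fsmbi, fsmbi_alt, mask_eq]
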